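-- pv_equiv track=rewrite | github.com/nainshi-95/PrPrTest | Check_temporal_residual_energy.py | find_ra_refs
-- ===== SOURCE A (Python) =====
-- def find_ra_refs(idx, processed):
--     left = None
--     right = None
--
--     for p in processed:
--         if p < idx:
--             if left is None or p > left:
--                 left = p
--         elif p > idx:
--             if right is None or p < right:
--                 right = p
--
--     return left, right
-- ===== SOURCE B (Python) =====
-- def find_ra_refs(idx, processed):
--     def go(lo, hi):
--         if hi <= lo:
--             return (None, None)
--         if hi == lo + 1:
--             p = processed[lo]
--             if p < idx:
--                 return (p, None)
--             if p > idx: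
--                 return (None, p)
--             return (None, None)
--         mid = (lo + hi) // 2
--         l1, r1 = go(lo, mid)
--         l2, r2 = go(mid, hi)
--         left = l1 if l2 is None else (l2 if l1 is None else max(l1, l2))
--         right = r1 if r2 is None else (r2 if r1 is None else min(r1, r2))
--         return (left, right)
--     return go(0, len(processed))
-- ===== Notes on version B (the rewrite author's own statement) =====
-- stated objective: alternative
-- what changed: Replaces A's single fused running-best scan with a divide-and-conquer recursion over index ranges: each half is solved independently and the two (left,right) candidate pairs are merged with max/min.
import Mathlib
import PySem

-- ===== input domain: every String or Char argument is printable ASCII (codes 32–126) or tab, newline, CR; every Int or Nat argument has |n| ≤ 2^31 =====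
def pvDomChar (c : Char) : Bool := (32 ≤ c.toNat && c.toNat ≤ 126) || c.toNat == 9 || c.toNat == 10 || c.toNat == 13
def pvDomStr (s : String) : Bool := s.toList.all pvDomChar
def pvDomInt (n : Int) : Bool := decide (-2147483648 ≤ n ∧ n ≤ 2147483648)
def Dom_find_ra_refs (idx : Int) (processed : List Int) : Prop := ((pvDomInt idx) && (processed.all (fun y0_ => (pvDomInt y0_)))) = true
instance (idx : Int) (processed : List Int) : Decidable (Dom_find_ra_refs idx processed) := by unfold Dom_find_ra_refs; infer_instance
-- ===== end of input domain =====

-- B replaces A's fused running-best scan with a divide-and-conquer recursion over index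
-- ranges, merging the two halves' (left, right) candidates with max/min (alternative decomposition).

-- ===== PORT A =====
-- literal transliteration of A's single loop updating (left, right)
def find_ra_refs (idx : Int) (processed : List Int) : Option Int × Option Int :=
  processed.foldl
    (fun (st : Option Int × Option Int) p =>
      if p < idx then
        (match st.1 with
         | none => some p
         | some l => if p > l then some p else some l, st.2)
      else if p > idx then
        (st.1,
         match st.2 with
         | none => some p
         | some r => if p < r then some p else some r)
      else st)
    (none, none)

-- ===== PORT B =====
-- 'l1 if l2 is None else (l2 if l1 is None else max(l1, l2))'
def pvMergeL (l1 l2 : Option Int) : Option Int :=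
  match l2 with
  | none => l1
  | some b => match l1 with
              | none => some b
              | some a => some (max a b)

-- 'r1 if r2 is None else (r2 if r1 is None else min(r1, r2))'
def pvMergeR (r1 r2 : Option Int) : Option Int :=
  match r2 with
  | none => r1
  | some b => match r1 with
              | none => some b
              | some a => some (min a b)

-- the nested 'go(lo, hi)' of Source B; the recursion terminates because hi - lo shrinks, expressed
-- here by structural recursion on a fuel bounding hi - lo (find_ra_refs_alt supplies enough);
-- processed[lo] is only reached with lo < len, where getD is exact
def pvGo (idx : Int) (processed : List Int) (fuel lo hi : Nat) : Option Int × Option Int :=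
  match fuel with
  | 0 => (none, none)
  | fuel + 1 =>
    if hi ≤ lo then (none, none)
    else if hi = lo + 1 then
      let p := processed.getD lo 0
      if p < idx then (some p, none)
      else if p > idx then (none, some p)
      else (none, none)
    else
      let mid := (lo + hi) / 2
      let a := pvGo idx processed fuel lo mid
      let b := pvGo idx processed fuel mid hi
      (pvMergeL a.1 b.1, pvMergeR a.2 b.2)

def find_ra_refs_alt (idx : Int) (processed : List Int) : Option Int × Option Int :=
  pvGo idx processed processed.length 0 processed.length

-- ===== PRECONDITION & SPEC =====
def Spec_find_ra_refs (idx : Int) (processed : List Int) (out : Option Int × Option Int) : Prop := out = find_ra_refs_alt idx processed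
instance (idx : Int) (processed : List Int) (out : Option Int × Option Int) : Decidable (Spec_find_ra_refs idx processed out) := by unfold Spec_find_ra_refs; infer_instance

-- ===== CLAIM (what is proved, stated in full; the proofs are below) =====
def Claim_equal_find_ra_refs : Prop := ∀ (idx : Int) (processed : List Int), Dom_find_ra_refs idx processed → Spec_find_ra_refs idx processed (find_ra_refs idx processed)

-- ===== LEMMAS AND PROOFS =====

def pvOMax (l : Option Int) (m : Option Int) : Option Int :=
  match l, m with
  | none, m => m
  | some a, none => some a
  | some a, some b => some (max a b)

def pvOMin (l : Option Int) (m : Option Int) : Option Int :=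
  match l, m with
  | none, m => m
  | some a, none => some a
  | some a, some b => some (min a b)

theorem mergeL_eq_omax (a b : Option Int) : pvMergeL a b = pvOMax a b := by
  cases a <;> cases b <;> rfl

theorem mergeR_eq_omin (a b : Option Int) : pvMergeR a b = pvOMin a b := by
  cases a <;> cases b <;> rfl

theorem foldl_max_pull (t : List Int) : ∀ a b : Int, t.foldl max (max a b) = max a (t.foldl max b) := by
  induction t with
  | nil => intro a b; rfl
  | cons h t ih =>
    intro a b
    simp only [List.foldl_cons, max_assoc]
    exact ih a (max b h)

theorem foldl_min_pull (t : List Int) : ∀ a b : Int, t.foldl min (min a b) = min a (t.foldl min b) := by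
  induction t with
  | nil => intro a b; rfl
  | cons h t ih =>
    intro a b
    simp only [List.foldl_cons, min_assoc]
    exact ih a (min b h)

theorem omax_cons (x : Int) (t : List Int) :
    pvOMax (some x) (PySem.List.max? t (fun y => y)) = PySem.List.max? (x :: t) (fun y => y) := by
  cases t with
  | nil => rfl
  | cons h t' =>
    rw [PySem.List.max?_id_cons, PySem.List.max?_id_cons]
    simp [pvOMax, List.foldl_cons, foldl_max_pull]

theorem omin_cons (x : Int) (t : List Int) :
    pvOMin (some x) (PySem.List.min? t (fun y => y)) = PySem.List.min? (x :: t) (fun y => y) := by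
  cases t with
  | nil => rfl
  | cons h t' =>
    rw [PySem.List.min?_id_cons, PySem.List.min?_id_cons]
    simp [pvOMin, List.foldl_cons, foldl_min_pull]

theorem omax_assoc' (l m n : Option Int) :
    pvOMax (pvOMax l m) n = pvOMax l (pvOMax m n) := by
  cases l <;> cases m <;> cases n <;> simp [pvOMax, max_assoc]

theorem omin_assoc' (l m n : Option Int) :
    pvOMin (pvOMin l m) n = pvOMin l (pvOMin m n) := by
  cases l <;> cases m <;> cases n <;> simp [pvOMin, min_assoc]

theorem omax_append (a b : List Int) :
    PySem.List.max? (a ++ b) (fun y => y)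
      = pvOMax (PySem.List.max? a (fun y => y)) (PySem.List.max? b (fun y => y)) := by
  induction a with
  | nil => simp [pvOMax, PySem.List.max?]
  | cons x t ih =>
    rw [List.cons_append, ← omax_cons, ih, ← omax_cons, omax_assoc']

theorem omin_append (a b : List Int) :
    PySem.List.min? (a ++ b) (fun y => y)
      = pvOMin (PySem.List.min? a (fun y => y)) (PySem.List.min? b (fun y => y)) := by
  induction a with
  | nil => simp [pvOMin, PySem.List.min?]
  | cons x t ih =>
    rw [List.cons_append, ← omin_cons, ih, ← omin_cons, omin_assoc']

-- the segment processed[lo:hi]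
def pvSeg (xs : List Int) (lo hi : Nat) : List Int := (xs.drop lo).take (hi - lo)

theorem seg_split (xs : List Int) (lo mid hi : Nat) (h1 : lo ≤ mid) (h2 : mid ≤ hi) :
    pvSeg xs lo hi = pvSeg xs lo mid ++ pvSeg xs mid hi := by
  unfold pvSeg
  have : hi - lo = (mid - lo) + (hi - mid) := by omega
  rw [this, List.take_add]
  congr 1
  rw [List.drop_drop]
  have h : lo + (mid - lo) = mid := by omega
  rw [h]

theorem seg_one (xs : List Int) (lo : Nat) (h : lo < xs.length) :
    pvSeg xs lo (lo + 1) = [xs.getD lo 0] := by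
  unfold pvSeg
  have h1 : lo + 1 - lo = 1 := by omega
  rw [h1, List.drop_eq_getElem_cons h]
  simp only [List.take_succ_cons, List.take_zero]
  simp [List.getD, List.getElem?_eq_getElem h]

theorem pvGo_char (idx : Int) (xs : List Int) : ∀ fuel lo hi : Nat, hi - lo ≤ fuel → lo ≤ hi → hi ≤ xs.length →
    pvGo idx xs fuel lo hi =
      (PySem.List.max? ((pvSeg xs lo hi).filter (fun p => decide (p < idx))) (fun y => y),
       PySem.List.min? ((pvSeg xs lo hi).filter (fun p => decide (p > idx))) (fun y => y)) := by
  intro fuel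
  induction fuel with
  | zero =>
    intro lo hi hf hle hlen
    have h0 : hi ≤ lo := by omega
    have hseg : pvSeg xs lo hi = [] := by
      unfold pvSeg; rw [Nat.sub_eq_zero_of_le h0]; rfl
    simp [pvGo, hseg, PySem.List.max?, PySem.List.min?]
  | succ n ih =>
    intro lo hi hf hle hlen
    rw [pvGo]
    by_cases h0 : hi ≤ lo
    · have hseg : pvSeg xs lo hi = [] := by
        unfold pvSeg; rw [Nat.sub_eq_zero_of_le h0]; rfl
      simp [h0, hseg, PySem.List.max?, PySem.List.min?]
    · rw [if_neg h0]
      by_cases h1 : hi = lo + 1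
      · subst h1
        rw [if_pos rfl]
        have hlo : lo < xs.length := by omega
        rw [seg_one xs lo hlo]
        by_cases hlt : xs[lo]?.getD 0 < idx
        · have hgt : ¬ xs[lo]?.getD 0 > idx := by omega
          simp [List.getD, hlt, hgt, PySem.List.max?, PySem.List.min?, List.filter]
        · by_cases hgt : xs[lo]?.getD 0 > idx
          · simp [List.getD, hlt, hgt, PySem.List.max?, PySem.List.min?, List.filter, List.foldl]
          · simp [List.getD, hlt, hgt, PySem.List.max?, PySem.List.min?, List.filter]
      · rw [if_neg h1]
        have hmid1 : lo < (lo + hi) / 2 := by omega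
        have hmid2 : (lo + hi) / 2 < hi := by omega
        show (pvMergeL (pvGo idx xs n lo ((lo + hi) / 2)).1 (pvGo idx xs n ((lo + hi) / 2) hi).1,
              pvMergeR (pvGo idx xs n lo ((lo + hi) / 2)).2 (pvGo idx xs n ((lo + hi) / 2) hi).2) = _
        rw [ih lo ((lo + hi) / 2) (by omega) (by omega) (by omega),
            ih ((lo + hi) / 2) hi (by omega) (by omega) hlen]
        rw [seg_split xs lo ((lo + hi) / 2) hi (by omega) (by omega)]
        simp only [List.filter_append, omax_append, omin_append, mergeL_eq_omax, mergeR_eq_omin]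

theorem loop_char (idx : Int) (xs : List Int) : ∀ l r : Option Int,
    xs.foldl
      (fun (st : Option Int × Option Int) p =>
        if p < idx then
          (match st.1 with
           | none => some p
           | some l => if p > l then some p else some l, st.2)
        else if p > idx then
          (st.1,
           match st.2 with
           | none => some p
           | some r => if p < r then some p else some r)
        else st)
      (l, r)
    = (pvOMax l (PySem.List.max? (xs.filter (fun p => decide (p < idx))) (fun x => x)),
       pvOMin r (PySem.List.min? (xs.filter (fun p => decide (p > idx))) (fun x => x))) := by
  induction xs with
  | nil =>
    intro l r
    cases l <;> cases r <;> rfl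
  | cons x t ih =>
    intro l r
    by_cases hlt : x < idx
    · have hgt : ¬ x > idx := by omega
      simp only [List.foldl_cons, List.filter_cons, hlt, hgt, decide_true, decide_false,
        if_true, if_false]
      rw [ih]
      rw [← omax_cons, ← omax_assoc']
      congr 1
      cases l with
      | none => simp [pvOMax]
      | some a =>
        simp only [pvOMax]
        split_ifs with h
        · simp [max_eq_right (le_of_lt h)]
        · simp [max_eq_left (not_lt.1 h)]
    · by_cases hgt : x > idx
      · simp only [List.foldl_cons, List.filter_cons, hlt, hgt, decide_true, decide_false,
          if_true, if_false]
        rw [ih]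
        rw [← omin_cons, ← omin_assoc']
        congr 1
        cases r with
        | none => simp [pvOMin]
        | some a =>
          simp only [pvOMin]
          split_ifs with h
          · simp [min_eq_right (le_of_lt h)]
          · simp [min_eq_left (not_lt.1 h)]
      · simp only [List.foldl_cons, List.filter_cons, hlt, hgt, decide_false, if_false]
        exact ih l r

-- ===== VERDICT (by name: the statement is the Claim_ definition above) =====
theorem find_ra_refs_spec : Claim_equal_find_ra_refs := by
  intro idx processed _
  unfold Spec_find_ra_refs find_ra_refs find_ra_refs_alt
  rw [loop_char, pvGo_char idx processed processed.length 0 processed.length le_rfl (Nat.zero_le _) le_rfl]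
  have : pvSeg processed 0 processed.length = processed := by
    unfold pvSeg; simp
  rw [this]
  cases hA : PySem.List.max? (processed.filter (fun p => decide (p < idx))) (fun x => x) <;>
  cases hB : PySem.List.min? (processed.filter (fun p => decide (p > idx))) (fun x => x) <;>
    simp [pvOMax, pvOMin]
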